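-- pv_equiv track=rewrite | github.com/taylor-vann/data-structures | Sorts/RadixSort.py | bucketish_sort
-- ===== SOURCE A (Python) =====
-- def bucketish_sort(aList, exp, mod, base = 10):
--     bucket = []
--
--     for i in range(base):
--         bucket.append([])
--
--     coll = []
--
--     for val in aList:
--         index = (val % exp)//mod
--         bucket[index].append(val)
--
--     for var in bucket:
--         coll += var
--
--     return coll
-- ===== SOURCE B (Python) =====
-- def bucketish_sort(aList, exp, mod, base = 10):
--     coll = []
--     for j in range(base):
--         coll += [v for v in aList if ((v % exp) // mod) % base == j]
--     return coll
-- ===== Notes on version B (the rewrite author's own statement) =====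
-- stated objective: simpler
-- what changed: B drops A's mutable list-of-lists bucket table (distribute each value into bucket[index], then concatenate the buckets) and instead makes one filtering pass per bucket index j in order, appending the values whose (val % exp)//mod equals j modulo base, so no intermediate table is built or mutated.
import Mathlib
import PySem

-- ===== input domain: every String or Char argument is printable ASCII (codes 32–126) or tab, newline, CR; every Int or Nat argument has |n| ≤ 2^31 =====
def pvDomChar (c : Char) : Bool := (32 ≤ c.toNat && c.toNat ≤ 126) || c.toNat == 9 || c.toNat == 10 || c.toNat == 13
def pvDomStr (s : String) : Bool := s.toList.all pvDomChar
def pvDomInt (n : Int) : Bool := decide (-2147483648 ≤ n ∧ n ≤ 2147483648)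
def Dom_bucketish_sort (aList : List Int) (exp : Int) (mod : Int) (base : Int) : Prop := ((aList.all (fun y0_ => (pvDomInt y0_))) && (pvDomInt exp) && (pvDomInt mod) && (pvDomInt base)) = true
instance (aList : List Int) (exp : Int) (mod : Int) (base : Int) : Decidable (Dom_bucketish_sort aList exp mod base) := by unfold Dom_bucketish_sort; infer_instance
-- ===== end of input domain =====

-- B replaces A's mutable bucket table by one in-order filtering pass per bucket index (simpler; return values proved equal).


-- ===== PORT A =====
-- one iteration of A's 'for val in aList' loop; none = the Python raised
-- (ZeroDivisionError on '% exp' / '// mod', IndexError on 'bucket[index]')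
def pvStepA (exp md : Int) : Option (List (List Int)) → Int → Option (List (List Int))
  | none, _ => none
  | some bucket, val =>
    if exp = 0 ∨ md = 0 then none
    else
      match PySem.List.pyGet? bucket (PySem.Int.floordiv (PySem.Int.mod val exp) md) with
      | none => none
      | some cur =>
          PySem.List.pySet? bucket (PySem.Int.floordiv (PySem.Int.mod val exp) md) (cur ++ [val])

def bucketish_sort (aList : List Int) (exp : Int) (mod : Int) (base : Int) : List Int :=
  match aList.foldl (pvStepA exp mod)
      (some ((PySem.List.pyRange 0 base 1).foldl (fun b _ => b ++ [([] : List Int)]) [])) with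
  | none => []   -- Python raised here; such inputs are outside Pre_bucketish_sort
  | some buckets => buckets.foldl (fun coll var => coll ++ var) []

-- ===== PORT B =====
def bucketish_sort_alt (aList : List Int) (exp : Int) (mod : Int) (base : Int) : List Int :=
  (PySem.List.pyRange 0 base 1).foldl
    (fun coll j =>
      coll ++ aList.filter
        (fun v => PySem.Int.mod (PySem.Int.floordiv (PySem.Int.mod v exp) mod) base == j))
    []

-- ===== PRECONDITION & SPEC =====
-- Pre_ excludes exactly the inputs on which A raises: a non-empty aList with exp = 0 or
-- mod = 0 (ZeroDivisionError) or with some bucket index (val % exp)//mod outside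
-- [-base, base) (IndexError; this also covers base ≤ 0 with a non-empty aList).
def Pre_bucketish_sort (aList : List Int) (exp : Int) (mod : Int) (base : Int) : Prop :=
  aList = [] ∨
    (exp ≠ 0 ∧ mod ≠ 0 ∧
      ∀ v ∈ aList,
        -base ≤ PySem.Int.floordiv (PySem.Int.mod v exp) mod ∧
          PySem.Int.floordiv (PySem.Int.mod v exp) mod < base)

instance (aList : List Int) (exp : Int) (mod : Int) (base : Int) :
    Decidable (Pre_bucketish_sort aList exp mod base) := by
  unfold Pre_bucketish_sort; infer_instance

def pvWitness_bucketish_sort : List Int × Int × Int × Int := ([3, 17, 25, 4], 100, 10, 10)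

def Spec_bucketish_sort (aList : List Int) (exp : Int) (mod : Int) (base : Int) (out : List Int) : Prop :=
  out = bucketish_sort_alt aList exp mod base
instance (aList : List Int) (exp : Int) (mod : Int) (base : Int) (out : List Int) :
    Decidable (Spec_bucketish_sort aList exp mod base out) := by
  unfold Spec_bucketish_sort; infer_instance

-- ===== CLAIM (what is proved, stated in full; the proofs are below) =====
def Claim_equal_bucketish_sort : Prop := ∀ (aList : List Int) (exp : Int) (mod : Int) (base : Int), Dom_bucketish_sort aList exp mod base → Pre_bucketish_sort aList exp mod base → Spec_bucketish_sort aList exp mod base (bucketish_sort aList exp mod base)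

-- ===== LEMMAS AND PROOFS =====

-- the raw bucket index of v, and its Python wrap into [0, base)
abbrev pvRIdx (exp md v : Int) : Int := PySem.Int.floordiv (PySem.Int.mod v exp) md
abbrev pvNIdx (exp md base v : Int) : Int := PySem.Int.mod (pvRIdx exp md v) base

-- the Nat position Python's (possibly negative) index selects in a list of length n
def pvW (n : Nat) (i : Int) : Nat := if 0 ≤ i then i.toNat else n - (-i).toNat

lemma pvW_lt (n : Nat) (i : Int) (h1 : -(n : Int) ≤ i) (h2 : i < n) : pvW n i < n := by
  unfold pvW; split_ifs <;> omega

lemma pyIdx?_of_range (n : Nat) (i : Int) (h1 : -(n : Int) ≤ i) (h2 : i < n) :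
    PySem.List.pyIdx? n i = some (pvW n i) := by
  unfold PySem.List.pyIdx? pvW
  split_ifs <;> first | rfl | omega

lemma pyGet?_of_range {α : Type} (xs : List α) (i : Int)
    (h1 : -(xs.length : Int) ≤ i) (h2 : i < xs.length) :
    PySem.List.pyGet? xs i = some (xs[pvW xs.length i]'(pvW_lt _ _ h1 h2)) := by
  simp [PySem.List.pyGet?, pyIdx?_of_range _ _ h1 h2,
    List.getElem?_eq_getElem (pvW_lt _ _ h1 h2)]

lemma pySet?_of_range {α : Type} (xs : List α) (i : Int) (v : α)
    (h1 : -(xs.length : Int) ≤ i) (h2 : i < xs.length) :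
    PySem.List.pySet? xs i v = some (xs.set (pvW xs.length i) v) := by
  simp [PySem.List.pySet?, pyIdx?_of_range _ _ h1 h2]

-- the wrapped position, cast back to Int, is the index taken modulo base
lemma pvW_cast (base i : Int) (h1 : -base ≤ i) (h2 : i < base) :
    ((pvW base.toNat i : Nat) : Int) = PySem.Int.mod i base := by
  have hb : 0 < base := by omega
  rw [PySem.Int.mod_eq_emod_of_pos hb]
  unfold pvW
  split_ifs with h0
  · rw [Int.emod_eq_of_lt h0 h2]; simp [Int.toNat_of_nonneg h0]
  · have hmod : i % base = i + base := by
      rw [← Int.add_emod_right]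
      exact Int.emod_eq_of_lt (by omega) (by omega)
    rw [hmod]; omega

-- the buckets after distributing l into table b: bucket j gains l's values with wrapped index j
def pvMerge (exp md base : Int) (b : List (List Int)) (l : List Int) : List (List Int) :=
  (List.range base.toNat).map
    (fun j => b.getD j [] ++ l.filter (fun v => pvNIdx exp md base v == (j : Int)))

lemma pvMerge_nil (exp md base : Int) (b : List (List Int)) (hb : b.length = base.toNat) :
    pvMerge exp md base b [] = b := by
  unfold pvMerge
  apply List.ext_getElem (by simpa using hb.symm)
  intro j hj hj'
  simp [List.getD, List.getElem?_eq_getElem hj']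

lemma pvMerge_set (exp md base : Int) (b : List (List Int)) (l : List Int) (v : Int)
    (hb : b.length = base.toNat)
    (w : Nat) (hw : w < b.length) (hww : ((w : Nat) : Int) = pvNIdx exp md base v) :
    pvMerge exp md base (b.set w (b[w] ++ [v])) l = pvMerge exp md base b (v :: l) := by
  unfold pvMerge
  apply List.map_congr_left
  intro j hj
  have hj' : j < b.length := hb ▸ List.mem_range.mp hj
  rw [List.filter_cons]
  by_cases hcase : j = w
  · subst hcase
    have hpred : (pvNIdx exp md base v == ((j : Nat) : Int)) = true := by simp [← hww]
    rw [hpred, if_pos rfl]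
    rw [List.getD_eq_getElem _ _ (by simpa using hj'), List.getD_eq_getElem _ _ hj']
    simp [List.getElem_set_self, List.append_assoc]
  · have hpred : (pvNIdx exp md base v == ((j : Nat) : Int)) = false := by
      simp [← hww, Nat.cast_inj]
      omega
    rw [hpred, if_neg (by simp)]
    rw [List.getD_eq_getElem _ _ (by simpa using hj'), List.getD_eq_getElem _ _ hj']
    rw [List.getElem_set_ne (by omega)]

lemma pvLoopA (exp md base : Int) (hexp : exp ≠ 0) (hmd : md ≠ 0) :
    ∀ (l : List Int) (b : List (List Int)), b.length = base.toNat →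
      (∀ v ∈ l, -base ≤ pvRIdx exp md v ∧ pvRIdx exp md v < base) →
      l.foldl (pvStepA exp md) (some b) = some (pvMerge exp md base b l) := by
  intro l
  induction l with
  | nil => intro b hb _; simp [pvMerge_nil exp md base b hb]
  | cons v l ih =>
    intro b hb hall
    obtain ⟨h1, h2⟩ := hall v (by simp)
    have hb1 : -(b.length : Int) ≤ pvRIdx exp md v := by rw [hb]; omega
    have hb2 : pvRIdx exp md v < (b.length : Int) := by rw [hb]; omega
    have hstep : pvStepA exp md (some b) v
        = some (b.set (pvW b.length (pvRIdx exp md v))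
            (b[pvW b.length (pvRIdx exp md v)]'(pvW_lt _ _ hb1 hb2) ++ [v])) := by
      simp only [pvStepA]
      rw [if_neg (by tauto), pyGet?_of_range b _ hb1 hb2]
      exact pySet?_of_range b _ _ hb1 hb2
    rw [List.foldl_cons, hstep,
      ih _ (by simpa using hb) (fun x hx => hall x (by simp [hx]))]
    congr 1
    have hww : ((pvW b.length (pvRIdx exp md v) : Nat) : Int) = pvNIdx exp md base v := by
      rw [hb]; exact pvW_cast base _ h1 h2
    exact pvMerge_set exp md base b l v hb _ (pvW_lt _ _ hb1 hb2) hww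

lemma pvBucketA_eq (base : Int) :
    (PySem.List.pyRange 0 base 1).foldl (fun b _ => b ++ [([] : List Int)]) []
      = List.replicate base.toNat ([] : List Int) := by
  rw [PySem.List.foldl_append_singleton_eq_map (f := fun _ => ([] : List Int))]
  simp [List.map_const', PySem.List.length_pyRange_one]

-- ===== VERDICT =====
theorem bucketish_sort_spec : Claim_equal_bucketish_sort := by
  unfold Claim_equal_bucketish_sort
  intro aList exp md base _ hpre
  unfold Spec_bucketish_sort
  simp only [bucketish_sort, bucketish_sort_alt]
  rcases hpre with hnil | ⟨hexp, hmd, hall⟩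
  · subst hnil
    rw [pvBucketA_eq]
    show (List.replicate base.toNat ([] : List Int)).foldl (fun coll var => coll ++ var) [] = _
    rw [PySem.List.foldl_append_eq_flatten]
    simp
  · rw [pvBucketA_eq, pvLoopA exp md base hexp hmd aList _ (by simp) hall]
    show (pvMerge exp md base (List.replicate base.toNat []) aList).foldl
        (fun coll var => coll ++ var) [] = _
    rw [PySem.List.foldl_append_eq_flatten,
      PySem.List.foldl_append_eq_flatMap
        (g := fun j => aList.filter
          (fun v => PySem.Int.mod (PySem.Int.floordiv (PySem.Int.mod v exp) md) base == j)),
      PySem.List.pyRange_one]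
    simp only [List.nil_append, List.flatMap_def, List.map_map, Int.sub_zero]
    unfold pvMerge
    apply congrArg List.flatten
    apply List.map_congr_left
    intro j hj
    have hj' : j < base.toNat := List.mem_range.mp hj
    rw [List.getD_replicate ([] : List Int) hj']
    simp [Function.comp, pvNIdx, pvRIdx]
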